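-- pv_equiv track=rewrite | github.com/jayaddison/timedelta-isoformat | src/timedelta_isoformat/__init__.py | _fromtimestring
-- ===== SOURCE A (Python) =====
-- _DECIMAL_CHARACTERS = frozenset(",.")
--
-- def _fromtimestring(time_string):
--     delimiters = [i for i, c in enumerate(time_string[0:15]) if c == ":"]
--     decimal = time_string[6:7] if delimiters == [] else time_string[8:9]
--
--     # HH:MM:SS[.ssssss]
--     if delimiters == [2, 5]:
--         yield time_string[0:2], "hours", 24
--         yield time_string[3:5], "minutes", 60
--         yield time_string[6:8], "seconds", 60
--         if not decimal:
--             return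
--         assert decimal in _DECIMAL_CHARACTERS, f"unexpected character '{decimal}'"
--         yield time_string[9:15].ljust(6, "0"), "microseconds", 999999
--
--     # HHMMSS[.ssssss]
--     elif delimiters == []:
--         yield time_string[0:2], "hours", 24
--         yield time_string[2:4], "minutes", 60
--         yield time_string[4:6], "seconds", 60
--         if not decimal:
--             return
--         assert decimal in _DECIMAL_CHARACTERS, f"unexpected character '{decimal}'"
--         yield time_string[7:13].ljust(6, "0"), "microseconds", 999999
--
--     else:
--         raise ValueError(f"unable to parse '{time_string}' into time components")
-- ===== SOURCE B (Python) =====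
-- _DECIMAL_CHARACTERS = frozenset(",.")
--
-- def _fromtimestring(time_string):
--     # Normalize: delete the two delimiters of the HH:MM:SS form, reducing both
--     # layouts to the single compact HHMMSS[.ssssss] layout, then parse once.
--     delimiters = [i for i, c in enumerate(time_string[0:15]) if c == ":"]
--     if delimiters == [2, 5]:
--         compact = time_string[:2] + time_string[3:5] + time_string[6:]
--     elif delimiters == []:
--         compact = time_string
--     else:
--         raise ValueError(f"unable to parse '{time_string}' into time components")
--
--     yield compact[0:2], "hours", 24
--     yield compact[2:4], "minutes", 60
--     yield compact[4:6], "seconds", 60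
--     decimal = compact[6:7]
--     if not decimal:
--         return
--     assert decimal in _DECIMAL_CHARACTERS, f"unexpected character '{decimal}'"
--     yield compact[7:13].ljust(6, "0"), "microseconds", 999999
-- ===== Notes on version B (the rewrite author's own statement) =====
-- stated objective: simpler
-- what changed: B normalizes the input first — deleting the two ':' delimiters reduces the HH:MM:SS layout to the compact HHMMSS layout — and then runs a single shared parser over the one canonical layout, instead of A's two duplicated per-format yield blocks with format-specific offsets.
import Mathlib
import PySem

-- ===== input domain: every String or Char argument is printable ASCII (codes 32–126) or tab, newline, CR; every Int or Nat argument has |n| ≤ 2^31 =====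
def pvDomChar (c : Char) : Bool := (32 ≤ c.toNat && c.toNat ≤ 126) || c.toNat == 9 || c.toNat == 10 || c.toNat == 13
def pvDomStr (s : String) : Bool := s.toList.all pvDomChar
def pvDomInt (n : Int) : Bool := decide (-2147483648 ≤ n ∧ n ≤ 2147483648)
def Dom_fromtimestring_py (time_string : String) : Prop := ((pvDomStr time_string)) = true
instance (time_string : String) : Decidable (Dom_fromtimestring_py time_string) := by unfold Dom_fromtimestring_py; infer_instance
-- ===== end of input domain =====

-- B normalizes the colon form to the compact layout (deleting the two delimiters) and then
-- parses the single canonical layout once, instead of A's two duplicated yield blocks.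

-- shared helper: the comprehension [i for i, c in enumerate(time_string[0:15]) if c == ":"]
def colonPositions (s : List Char) : List Int :=
  ((PySem.List.enumerate (PySem.List.slice s (some 0) (some 15))).filter (fun p => p.2 == ':')).map Prod.fst

-- Python's str.ljust(6, "0") on the code-point list (exact: pad on the right to length 6)
def ljust6zero (xs : List Char) : List Char := xs ++ List.replicate (6 - xs.length) '0'

-- ===== PORT A =====
-- where the Python generator raises (ValueError in the else branch, AssertionError on a bad
-- decimal character) the port's value is irrelevant: Pre_ excludes those inputs.
def fromtimestring_py (time_string : String) : List (String × String × Int) :=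
  let s := time_string.toList
  let delimiters := colonPositions s
  let decimal := if delimiters = [] then PySem.List.slice s (some 6) (some 7)
                 else PySem.List.slice s (some 8) (some 9)
  if delimiters = [2, 5] then
    let base := [(String.ofList (PySem.List.slice s (some 0) (some 2)), ("hours", (24 : Int))),
                 (String.ofList (PySem.List.slice s (some 3) (some 5)), ("minutes", (60 : Int))),
                 (String.ofList (PySem.List.slice s (some 6) (some 8)), ("seconds", (60 : Int)))]
    if decimal = [] then base
    else if decimal = [','] ∨ decimal = ['.'] then
      base ++ [(String.ofList (ljust6zero (PySem.List.slice s (some 9) (some 15))), ("microseconds", (999999 : Int)))]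
    else base  -- AssertionError (outside Pre_)
  else if delimiters = [] then
    let base := [(String.ofList (PySem.List.slice s (some 0) (some 2)), ("hours", (24 : Int))),
                 (String.ofList (PySem.List.slice s (some 2) (some 4)), ("minutes", (60 : Int))),
                 (String.ofList (PySem.List.slice s (some 4) (some 6)), ("seconds", (60 : Int)))]
    if decimal = [] then base
    else if decimal = [','] ∨ decimal = ['.'] then
      base ++ [(String.ofList (ljust6zero (PySem.List.slice s (some 7) (some 13))), ("microseconds", (999999 : Int)))]
    else base  -- AssertionError (outside Pre_)
  else []  -- ValueError (outside Pre_)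

-- ===== PORT B =====
def fromtimestring_py_alt (time_string : String) : List (String × String × Int) :=
  let s := time_string.toList
  let delimiters := colonPositions s
  let compact? : Option (List Char) :=
    if delimiters = [2, 5] then
      some (PySem.List.slice s none (some 2) ++ PySem.List.slice s (some 3) (some 5) ++
            PySem.List.slice s (some 6) none)
    else if delimiters = [] then some s
    else none  -- ValueError (outside Pre_)
  match compact? with
  | none => []
  | some compact =>
    let base := [(String.ofList (PySem.List.slice compact (some 0) (some 2)), ("hours", (24 : Int))),
                 (String.ofList (PySem.List.slice compact (some 2) (some 4)), ("minutes", (60 : Int))),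
                 (String.ofList (PySem.List.slice compact (some 4) (some 6)), ("seconds", (60 : Int)))]
    let decimal := PySem.List.slice compact (some 6) (some 7)
    if decimal = [] then base
    else if decimal = [','] ∨ decimal = ['.'] then
      base ++ [(String.ofList (ljust6zero (PySem.List.slice compact (some 7) (some 13))), ("microseconds", (999999 : Int)))]
    else base  -- AssertionError (outside Pre_)

-- ===== PRECONDITION & SPEC =====
-- Pre_ holds exactly where the Python generator A yields all its items without raising:
-- the colons in the first 15 characters are exactly at positions 2 and 5, or absent, and
-- the character at the decimal position (if any) is a decimal separator.
def Pre_fromtimestring_py (time_string : String) : Prop :=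
  let s := time_string.toList
  (colonPositions s = [2, 5] ∧
    (PySem.List.slice s (some 8) (some 9) = [] ∨
     PySem.List.slice s (some 8) (some 9) = [','] ∨ PySem.List.slice s (some 8) (some 9) = ['.'])) ∨
  (colonPositions s = [] ∧
    (PySem.List.slice s (some 6) (some 7) = [] ∨
     PySem.List.slice s (some 6) (some 7) = [','] ∨ PySem.List.slice s (some 6) (some 7) = ['.']))
instance (time_string : String) : Decidable (Pre_fromtimestring_py time_string) := by
  unfold Pre_fromtimestring_py; infer_instance

def pvWitness_fromtimestring_py : String := "01:02:03"

def Spec_fromtimestring_py (time_string : String) (out : List (String × String × Int)) : Prop := out = fromtimestring_py_alt time_string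
instance (time_string : String) (out : List (String × String × Int)) : Decidable (Spec_fromtimestring_py time_string out) := by unfold Spec_fromtimestring_py; infer_instance

-- ===== CLAIM (what is proved, stated in full; the proofs are below) =====
def Claim_equal_fromtimestring_py : Prop := ∀ (time_string : String), Dom_fromtimestring_py time_string → Pre_fromtimestring_py time_string → Spec_fromtimestring_py time_string (fromtimestring_py time_string)

-- ===== LEMMAS AND PROOFS =====

-- every colon position lies below the string's length
lemma colonPositions_lt_length {s : List Char} {i : Int} (h : i ∈ colonPositions s) :
    0 ≤ i ∧ i < s.length := by
  unfold colonPositions at h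
  simp only [List.mem_map, List.mem_filter] at h
  obtain ⟨⟨j, c⟩, ⟨hmem, _⟩, rfl⟩ := h
  have hj : j ∈ (PySem.List.enumerate (PySem.List.slice s (some 0) (some 15))).map Prod.fst :=
    List.mem_map_of_mem hmem
  rw [PySem.List.map_fst_enumerate, PySem.List.mem_pyRange_one] at hj
  have h2 : j < ((PySem.List.slice s (some 0) (some 15)).length : Int) := by simpa using hj.2
  have hlen : (PySem.List.slice s (some 0) (some 15)).length ≤ s.length := by
    simp
  exact ⟨hj.1, lt_of_lt_of_le h2 (by exact_mod_cast hlen)⟩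

-- the colon form has at least six characters
lemma length_ge_six_of_colons {s : List Char} (h : colonPositions s = [2, 5]) :
    6 ≤ s.length := by
  have h5 : (5 : Int) ∈ colonPositions s := by rw [h]; simp
  have := (colonPositions_lt_length h5).2
  omega

-- ===== VERDICT (by name: the statement is the Claim_ definition above) =====
set_option maxHeartbeats 2000000 in
theorem fromtimestring_py_spec : Claim_equal_fromtimestring_py := by
  intro t _ hpre
  unfold Pre_fromtimestring_py at hpre
  unfold Spec_fromtimestring_py fromtimestring_py fromtimestring_py_alt
  rcases hpre with ⟨h25, _⟩ | ⟨h0, _⟩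
  · -- colon form: t.toList = a :: b :: ':' :: c :: d :: ':' :: rest (length ≥ 6); the
    -- normalized compact list is a :: b :: c :: d :: rest, whose slices equal A's shifted slices.
    have hlen := length_ge_six_of_colons h25
    obtain ⟨a, b, x, c, d, y, rest, hdec⟩ :
        ∃ a b x c d y rest, t.toList = a :: b :: x :: c :: d :: y :: rest := by
      match hm : t.toList, hlen with
      | a :: b :: x :: c :: d :: y :: rest, _ => exact ⟨a, b, x, c, d, y, rest, rfl⟩
    simp [pysem, hdec, hdec ▸ h25, show ¬([(2 : Int), 5] = ([] : List Int)) by decide]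
  · simp [h0]
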